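-- pv_equiv track=rewrite | github.com/krishan001/Undead-AI-Solver | UndeadAI.py | countNumMonsters
-- ===== SOURCE A (Python) =====
-- def countNumMonsters(matrix):
--     numG, numV, numZ = 0,0,0
--     for row in matrix:
--         for c in row:
--             if c == "g":
--                 numG += 1
--             if c == "v":
--                 numV += 1
--             if c == "z":
--                 numZ += 1
--     return numG, numV, numZ
-- ===== SOURCE B (Python) =====
-- def countNumMonsters(matrix):
--     return (sum(row.count("g") for row in matrix),
--             sum(row.count("v") for row in matrix),
--             sum(row.count("z") for row in matrix))
-- ===== Notes on version B (the rewrite author's own statement) =====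
-- stated objective: idiomatic
-- what changed: Replaces A's single fold carrying a 3-counter state with three independent counting passes, each delegated to list.count/sum.
import Mathlib
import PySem

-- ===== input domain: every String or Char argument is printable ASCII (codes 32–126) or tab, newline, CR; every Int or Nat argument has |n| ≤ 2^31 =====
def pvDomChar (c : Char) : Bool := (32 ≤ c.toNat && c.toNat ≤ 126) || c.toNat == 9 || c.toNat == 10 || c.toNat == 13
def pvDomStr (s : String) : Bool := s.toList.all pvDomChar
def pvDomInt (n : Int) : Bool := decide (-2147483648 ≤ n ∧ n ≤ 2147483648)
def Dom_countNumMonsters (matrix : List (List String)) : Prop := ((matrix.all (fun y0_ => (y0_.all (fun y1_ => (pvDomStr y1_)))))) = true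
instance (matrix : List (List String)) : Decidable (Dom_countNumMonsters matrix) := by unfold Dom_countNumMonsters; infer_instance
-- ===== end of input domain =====

-- ===== PORT A =====
-- B replaces A's single fold with three independent counting passes (idiomatic).
def countNumMonsters (matrix : List (List String)) : Int × Int × Int :=
  matrix.foldl (fun acc row =>
    row.foldl (fun (a : Int × Int × Int) c =>
      let a := if c == "g" then (a.1 + 1, a.2.1, a.2.2) else a
      let a := if c == "v" then (a.1, a.2.1 + 1, a.2.2) else a
      if c == "z" then (a.1, a.2.1, a.2.2 + 1) else a) acc) (0, 0, 0)

-- ===== PORT B =====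
def countNumMonsters_alt (matrix : List (List String)) : Int × Int × Int :=
  ((matrix.map (fun row => (PySem.List.count row "g" : Int))).sum,
   (matrix.map (fun row => (PySem.List.count row "v" : Int))).sum,
   (matrix.map (fun row => (PySem.List.count row "z" : Int))).sum)

-- ===== PRECONDITION & SPEC =====
def Spec_countNumMonsters (matrix : List (List String)) (out : Int × Int × Int) : Prop := out = countNumMonsters_alt matrix
instance (matrix : List (List String)) (out : Int × Int × Int) : Decidable (Spec_countNumMonsters matrix out) := by unfold Spec_countNumMonsters; infer_instance

-- ===== CLAIM (what is proved, stated in full; the proofs are below) =====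
def Claim_equal_countNumMonsters : Prop := ∀ (matrix : List (List String)), Dom_countNumMonsters matrix → Spec_countNumMonsters matrix (countNumMonsters matrix)

-- ===== LEMMAS AND PROOFS =====

-- ===== VERDICT (by name: the statement is the Claim_ definition above) =====
lemma inner_fold (row : List String) (a : Int × Int × Int) :
    row.foldl (fun (a : Int × Int × Int) c =>
      let a := if c == "g" then (a.1 + 1, a.2.1, a.2.2) else a
      let a := if c == "v" then (a.1, a.2.1 + 1, a.2.2) else a
      if c == "z" then (a.1, a.2.1, a.2.2 + 1) else a) a
    = (a.1 + PySem.List.count row "g", a.2.1 + PySem.List.count row "v",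
       a.2.2 + PySem.List.count row "z") := by
  induction row generalizing a with
  | nil => simp [PySem.List.count]
  | cons c cs ih =>
    simp only [List.foldl_cons, ih, PySem.List.count, List.count_cons]
    by_cases hg : c = "g" <;> by_cases hv : c = "v" <;> by_cases hz : c = "z" <;>
      simp_all <;> push_cast <;> ring_nf

lemma outer_fold (matrix : List (List String)) (a : Int × Int × Int) :
    matrix.foldl (fun acc row =>
      row.foldl (fun (a : Int × Int × Int) c =>
        let a := if c == "g" then (a.1 + 1, a.2.1, a.2.2) else a
        let a := if c == "v" then (a.1, a.2.1 + 1, a.2.2) else a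
        if c == "z" then (a.1, a.2.1, a.2.2 + 1) else a) acc) a
    = (a.1 + (matrix.map (fun row => (PySem.List.count row "g" : Int))).sum,
       a.2.1 + (matrix.map (fun row => (PySem.List.count row "v" : Int))).sum,
       a.2.2 + (matrix.map (fun row => (PySem.List.count row "z" : Int))).sum) := by
  induction matrix generalizing a with
  | nil => simp
  | cons row ms ih =>
    rw [List.foldl_cons, inner_fold, ih]
    refine Prod.ext ?_ (Prod.ext ?_ ?_) <;> simp only [List.map_cons, List.sum_cons] <;> ring

theorem countNumMonsters_spec : Claim_equal_countNumMonsters := by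
  intro matrix _
  show countNumMonsters matrix = countNumMonsters_alt matrix
  unfold countNumMonsters countNumMonsters_alt
  rw [outer_fold]
  norm_num
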